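-- pv_equiv track=rewrite | github.com/sc-YI/vscode | 2447re.py | makestar
-- ===== SOURCE A (Python) =====
-- def makestar(n):
--     matrix=[] # 빈 리스트 생성
--     for i in range(3 * len(n)):
--         if i // len(n) == 1:
--             matrix.append(n[i % len(n)] + " " * len(n) + n[i % len(n)])
--         else:
--             matrix.append(n[i % len(n)] * 3)
--     return(list(matrix))
-- ===== SOURCE B (Python) =====
-- def makestar(n):
--     solid = [x * 3 for x in n]
--     hollow = [x + " " * len(n) + x for x in n]
--     return solid + hollow + solid
-- ===== Notes on version B (the rewrite author's own statement) =====
-- stated objective: simpler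
-- what changed: Replaces the single modular-indexed loop over range(3*len(n)) with three comprehensions over n (solid, hollow, solid) concatenated, eliminating the i//L branch and i%L indexing.
import Mathlib
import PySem

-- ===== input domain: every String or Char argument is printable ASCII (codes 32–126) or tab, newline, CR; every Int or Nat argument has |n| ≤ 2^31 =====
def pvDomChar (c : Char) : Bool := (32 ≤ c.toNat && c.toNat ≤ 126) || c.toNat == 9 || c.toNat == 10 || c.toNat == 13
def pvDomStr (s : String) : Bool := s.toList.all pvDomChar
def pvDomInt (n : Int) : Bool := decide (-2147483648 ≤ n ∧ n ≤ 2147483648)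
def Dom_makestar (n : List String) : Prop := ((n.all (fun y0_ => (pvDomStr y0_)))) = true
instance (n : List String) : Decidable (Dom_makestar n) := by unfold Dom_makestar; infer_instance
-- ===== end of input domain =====

-- B replaces A's single modular-indexed loop over range(3*len(n)) with three
-- comprehensions over n concatenated (objective: simpler).

-- Python's  s * k  (string repetition), shared primitive of both ports
def strMul (s : String) (k : Nat) : String := String.join (List.replicate k s)

-- ===== PORT A =====
def makestar (n : List String) : List String :=
  (PySem.List.pyRange 0 (3 * (n.length : Int)) 1).foldl
    (fun matrix i =>
      if PySem.Int.floordiv i (n.length : Int) == 1 then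
        matrix ++ [PySem.List.pyGetD n (PySem.Int.mod i (n.length : Int)) "" ++
                   strMul " " n.length ++
                   PySem.List.pyGetD n (PySem.Int.mod i (n.length : Int)) ""]
      else
        matrix ++ [strMul (PySem.List.pyGetD n (PySem.Int.mod i (n.length : Int)) "") 3])
    []

-- ===== PORT B =====
def makestar_alt (n : List String) : List String :=
  let solid := n.map (fun x => strMul x 3)
  let hollow := n.map (fun x => x ++ strMul " " n.length ++ x)
  solid ++ hollow ++ solid

-- ===== PRECONDITION & SPEC =====
def Spec_makestar (n : List String) (out : List String) : Prop := out = makestar_alt n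
instance (n : List String) (out : List String) : Decidable (Spec_makestar n out) := by unfold Spec_makestar; infer_instance

-- ===== CLAIM (what is proved, stated in full; the proofs are below) =====
def Claim_equal_makestar : Prop := ∀ (n : List String), Dom_makestar n → Spec_makestar n (makestar n)

-- ===== LEMMAS AND PROOFS =====

-- mapping f over the entries of n, written via range-indexing, is n.map f
theorem map_range_getD {α β : Type} (n : List α) (f : α → β) (d : α) :
    (List.range n.length).map (fun k => f (n.getD k d)) = n.map f := by
  apply List.ext_getElem
  · simp
  · intro i h1 h2
    simp at h1 ⊢
    simp [h1]

theorem makestar_body (n : List String) (L : Nat) (hL : L = n.length) :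
    makestar n =
      (List.range (3 * L)).map (fun k : Nat =>
        if PySem.Int.floordiv (k : Int) (L : Int) == 1 then
          PySem.List.pyGetD n (PySem.Int.mod (k : Int) (L : Int)) "" ++
            strMul " " L ++ PySem.List.pyGetD n (PySem.Int.mod (k : Int) (L : Int)) ""
        else strMul (PySem.List.pyGetD n (PySem.Int.mod (k : Int) (L : Int)) "") 3) := by
  subst hL
  unfold makestar
  have hfun : (fun (matrix : List String) (i : Int) =>
      if PySem.Int.floordiv i (n.length : Int) == 1 then
        matrix ++ [PySem.List.pyGetD n (PySem.Int.mod i (n.length : Int)) "" ++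
                   strMul " " n.length ++
                   PySem.List.pyGetD n (PySem.Int.mod i (n.length : Int)) ""]
      else
        matrix ++ [strMul (PySem.List.pyGetD n (PySem.Int.mod i (n.length : Int)) "") 3])
      = (fun matrix i => matrix ++
          [if PySem.Int.floordiv i (n.length : Int) == 1 then
             PySem.List.pyGetD n (PySem.Int.mod i (n.length : Int)) "" ++
               strMul " " n.length ++
               PySem.List.pyGetD n (PySem.Int.mod i (n.length : Int)) ""
           else strMul (PySem.List.pyGetD n (PySem.Int.mod i (n.length : Int)) "") 3]) := by
    funext m i
    split <;> rfl
  rw [hfun, PySem.List.foldl_append_singleton_eq_map, List.nil_append,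
      PySem.List.pyRange_one]
  have h3 : ((3 * (n.length : Int) - 0).toNat) = 3 * n.length := by omega
  rw [h3, List.map_map]
  apply List.map_congr_left
  intro k _
  simp

theorem makestar_spec_aux (n : List String) : makestar n = makestar_alt n := by
  rcases Nat.eq_zero_or_pos n.length with h0 | hpos
  · have hn : n = [] := List.eq_nil_of_length_eq_zero h0
    subst hn
    simp [makestar, makestar_alt]
  · rw [makestar_body n n.length rfl]
    set L := n.length with hLdef
    have hsplit : 3 * L = L + (L + L) := by omega
    rw [hsplit]
    simp only [List.range_add, List.map_append, List.map_map]
    have key : ∀ (a : Nat), a < 3 →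
        ∀ k, k < L →
          ((PySem.Int.floordiv ((a * L + k : Nat) : Int) (L : Int)) = (a : Int)) ∧
          ((PySem.Int.mod ((a * L + k : Nat) : Int) (L : Int)) = (k : Int)) := by
      intro a _ k hk
      constructor
      · rw [PySem.Int.floordiv_natCast]
        have : (a * L + k) / L = a := by
          rw [Nat.mul_comm a L, Nat.mul_add_div hpos, Nat.div_eq_of_lt hk, Nat.add_zero]
        rw [this]
      · rw [PySem.Int.mod_natCast]
        have : (a * L + k) % L = k := by
          rw [Nat.mul_comm a L, Nat.mul_add_mod, Nat.mod_eq_of_lt hk]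
        rw [this]
    have b1 : (List.range L).map (fun (k : Nat) =>
        if PySem.Int.floordiv (k : Int) (L : Int) == 1 then
          PySem.List.pyGetD n (PySem.Int.mod (k : Int) (L : Int)) "" ++
            strMul " " L ++ PySem.List.pyGetD n (PySem.Int.mod (k : Int) (L : Int)) ""
        else strMul (PySem.List.pyGetD n (PySem.Int.mod (k : Int) (L : Int)) "") 3)
        = n.map (fun x => strMul x 3) := by
      rw [← map_range_getD n (fun x => strMul x 3) "", ← hLdef]
      apply List.map_congr_left
      intro k hk
      rw [List.mem_range] at hk
      obtain ⟨hd, hm⟩ := key 0 (by omega) k (by simpa using hk)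
      simp only [Nat.zero_mul, Nat.zero_add] at hd hm
      rw [hd, hm]
      simp [PySem.List.pyGetD_natCast]
    have b2 : (List.range L).map ((fun (k : Nat) =>
        if PySem.Int.floordiv (k : Int) (L : Int) == 1 then
          PySem.List.pyGetD n (PySem.Int.mod (k : Int) (L : Int)) "" ++
            strMul " " L ++ PySem.List.pyGetD n (PySem.Int.mod (k : Int) (L : Int)) ""
        else strMul (PySem.List.pyGetD n (PySem.Int.mod (k : Int) (L : Int)) "") 3) ∘ (L + ·))
        = n.map (fun x => x ++ strMul " " L ++ x) := by
      rw [← map_range_getD n (fun x => x ++ strMul " " L ++ x) "", ← hLdef]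
      apply List.map_congr_left
      intro k hk
      rw [List.mem_range] at hk
      obtain ⟨hd, hm⟩ := key 1 (by omega) k hk
      simp only [Nat.one_mul] at hd hm
      simp only [Function.comp]
      rw [hd, hm]
      simp [PySem.List.pyGetD_natCast]
    have b3 : (List.range L).map ((fun (k : Nat) =>
        if PySem.Int.floordiv (k : Int) (L : Int) == 1 then
          PySem.List.pyGetD n (PySem.Int.mod (k : Int) (L : Int)) "" ++
            strMul " " L ++ PySem.List.pyGetD n (PySem.Int.mod (k : Int) (L : Int)) ""
        else strMul (PySem.List.pyGetD n (PySem.Int.mod (k : Int) (L : Int)) "") 3) ∘ ((L + ·) ∘ (L + ·)))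
        = n.map (fun x => strMul x 3) := by
      rw [← map_range_getD n (fun x => strMul x 3) "", ← hLdef]
      apply List.map_congr_left
      intro k hk
      rw [List.mem_range] at hk
      obtain ⟨hd, hm⟩ := key 2 (by omega) k hk
      have harg : L + (L + k) = 2 * L + k := by omega
      simp only [Function.comp]
      rw [harg, hd, hm]
      simp [PySem.List.pyGetD_natCast]
    rw [b1, b2, b3]
    simp [makestar_alt, List.append_assoc, hLdef]

-- ===== VERDICT (by name: the statement is the Claim_ definition above) =====
theorem makestar_spec : Claim_equal_makestar := by
  intro n _
  unfold Spec_makestar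
  exact makestar_spec_aux n
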